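-- pv_equiv track=rewrite | github.com/saif-aziz/Trend-Tactix | trend-tactix-backend/advanced_model_optimization.py | _extract_best_params_from_optuna
-- ===== SOURCE A (Python) =====
-- def _extract_best_params_from_optuna(best_params):
--     """Extract best parameters from Optuna study"""
--     extracted_params = {}
--
--     # Group parameters by model
--     for key, value in best_params.items():
--         if key.startswith('rf_'):
--             if 'rf' not in extracted_params:
--                 extracted_params['rf'] = {}
--             param_name = key[3:]  # Remove 'rf_' prefix
--             extracted_params['rf'][param_name] = value
--         elif key.startswith('xgb_'):
--             if 'xgb' not in extracted_params:
--                 extracted_params['xgb'] = {}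
--             param_name = key[4:]  # Remove 'xgb_' prefix
--             extracted_params['xgb'][param_name] = value
--         elif key.startswith('lgb_'):
--             if 'lgb' not in extracted_params:
--                 extracted_params['lgb'] = {}
--             param_name = key[4:]  # Remove 'lgb_' prefix
--             extracted_params['lgb'][param_name] = value
--
--     return extracted_params
-- ===== SOURCE B (Python) =====
-- def _extract_best_params_from_optuna(best_params):
--     """Extract best parameters from Optuna study"""
--     prefixes = {'rf': 'rf_', 'xgb': 'xgb_', 'lgb': 'lgb_'}
--     # pass 1: determine the groups present, in order of first appearance
--     order = []
--     for key in best_params: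
--         for group, prefix in prefixes.items():
--             if key.startswith(prefix) and group not in order:
--                 order.append(group)
--     # pass 2: build each group's dict by filtering the params once per group
--     return {group: {key[len(prefixes[group]):]: value
--                     for key, value in best_params.items()
--                     if key.startswith(prefixes[group])}
--             for group in order}
-- ===== Notes on version B (the rewrite author's own statement) =====
-- stated objective: alternative
-- what changed: Replaces A's single accumulating pass of three copy-pasted if/elif branches by two staged passes: pass 1 collects the groups present in first-appearance order, pass 2 builds each group's dict with a per-group filtering comprehension over the whole input.
import Mathlib
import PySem

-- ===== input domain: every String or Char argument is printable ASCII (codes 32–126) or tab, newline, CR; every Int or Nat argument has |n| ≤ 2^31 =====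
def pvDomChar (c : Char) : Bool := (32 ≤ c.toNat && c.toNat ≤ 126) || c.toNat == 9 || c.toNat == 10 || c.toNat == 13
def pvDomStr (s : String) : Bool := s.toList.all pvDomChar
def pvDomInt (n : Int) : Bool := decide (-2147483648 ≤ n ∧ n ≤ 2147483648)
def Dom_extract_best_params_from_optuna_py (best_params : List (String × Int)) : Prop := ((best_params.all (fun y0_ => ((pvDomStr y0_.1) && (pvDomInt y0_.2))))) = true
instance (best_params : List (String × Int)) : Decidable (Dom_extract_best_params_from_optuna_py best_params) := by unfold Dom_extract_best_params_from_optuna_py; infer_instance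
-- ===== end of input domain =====

-- B replaces A's single accumulating pass of three copy-pasted if/elif branches by two
-- staged passes: first collect the groups present in first-appearance order, then build
-- each group's dict by a per-group filtering comprehension (objective: alternative).

-- ===== PORT A =====
-- one loop iteration of A: the three if/elif branches (inner-dict mutation
-- extracted_params[g][name] = value is an overwrite-in-place of key g, hence insert)
def pvStepA (d : PySem.Dict String (PySem.Dict String Int)) (kv : String × Int) :
    PySem.Dict String (PySem.Dict String Int) :=
  if PySem.Str.startswith kv.1 "rf_" then
    let d1 := if d.contains "rf" then d else d.insert "rf" PySem.Dict.empty
    d1.insert "rf" ((d1.getD "rf" PySem.Dict.empty).insert (PySem.Str.slice kv.1 (some 3) none) kv.2)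
  else if PySem.Str.startswith kv.1 "xgb_" then
    let d1 := if d.contains "xgb" then d else d.insert "xgb" PySem.Dict.empty
    d1.insert "xgb" ((d1.getD "xgb" PySem.Dict.empty).insert (PySem.Str.slice kv.1 (some 4) none) kv.2)
  else if PySem.Str.startswith kv.1 "lgb_" then
    let d1 := if d.contains "lgb" then d else d.insert "lgb" PySem.Dict.empty
    d1.insert "lgb" ((d1.getD "lgb" PySem.Dict.empty).insert (PySem.Str.slice kv.1 (some 4) none) kv.2)
  else d

def extract_best_params_from_optuna_py (best_params : List (String × Int)) : List (String × List (String × Int)) :=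
  ((best_params.foldl pvStepA PySem.Dict.empty).items).map (fun p => (p.1, p.2.items))

-- ===== PORT B =====
-- prefixes = {'rf': 'rf_', 'xgb': 'xgb_', 'lgb': 'lgb_'}
def pvPrefixes : PySem.Dict String String :=
  PySem.Dict.ofList [("rf", "rf_"), ("xgb", "xgb_"), ("lgb", "lgb_")]

-- pass 1, inner loop: for group, prefix in prefixes.items(): if key.startswith(prefix)
-- and group not in order: order.append(group)
def pvOrderStep (ord : List String) (key : String) : List String :=
  pvPrefixes.items.foldl
    (fun o gp => if PySem.Str.startswith key gp.2 && !(o.contains gp.1) then o ++ [gp.1] else o) ord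

def pvOrder (bp : List (String × Int)) : List String :=
  bp.foldl (fun o kv => pvOrderStep o kv.1) []

-- pass 2, one group's dict: {key[len(prefixes[group]):]: value for key, value in
-- best_params.items() if key.startswith(prefixes[group])}
def pvInner (bp : List (String × Int)) (g : String) : PySem.Dict String Int :=
  bp.foldl
    (fun d kv => if PySem.Str.startswith kv.1 (pvPrefixes.getD g "")
      then d.insert (PySem.Str.slice kv.1 (some (PySem.Str.len (pvPrefixes.getD g ""))) none) kv.2
      else d)
    PySem.Dict.empty

def extract_best_params_from_optuna_py_alt (best_params : List (String × Int)) : List (String × List (String × Int)) :=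
  (((pvOrder best_params).foldl (fun d g => d.insert g (pvInner best_params g)) PySem.Dict.empty).items).map
    (fun p => (p.1, p.2.items))

-- ===== PRECONDITION & SPEC =====
def Spec_extract_best_params_from_optuna_py (best_params : List (String × Int)) (out : List (String × List (String × Int))) : Prop := out = extract_best_params_from_optuna_py_alt best_params
instance (best_params : List (String × Int)) (out : List (String × List (String × Int))) : Decidable (Spec_extract_best_params_from_optuna_py best_params out) := by unfold Spec_extract_best_params_from_optuna_py; infer_instance

-- ===== CLAIM (what is proved, stated in full; the proofs are below) =====
def Claim_equal_extract_best_params_from_optuna_py : Prop := ∀ (best_params : List (String × Int)), Dom_extract_best_params_from_optuna_py best_params → Spec_extract_best_params_from_optuna_py best_params (extract_best_params_from_optuna_py best_params)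

-- ===== LEMMAS AND PROOFS =====

-- which (group, prefix) a key falls into, following A's if/elif order (proof device)
def pvMatch (key : String) : Option (String × String) :=
  if PySem.Str.startswith key "rf_" then some ("rf", "rf_")
  else if PySem.Str.startswith key "xgb_" then some ("xgb", "xgb_")
  else if PySem.Str.startswith key "lgb_" then some ("lgb", "lgb_")
  else none

def pvTriples : List (String × String) := [("rf", "rf_"), ("xgb", "xgb_"), ("lgb", "lgb_")]

-- a string cannot start with two prefixes whose first characters differ
lemma pv_clash (s p q : String) (a b : Char) (hp : p.toList.head? = some a)
    (hq : q.toList.head? = some b) (hab : a ≠ b)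
    (h : PySem.Str.startswith s p = true) : PySem.Str.startswith s q = false := by
  cases hb : PySem.Str.startswith s q
  · rfl
  · exfalso
    rw [PySem.Str.startswith_eq] at h hb
    obtain ⟨t1, h1⟩ := (PySem.Chars.startswith_iff _ _).mp h
    obtain ⟨t2, h2⟩ := (PySem.Chars.startswith_iff _ _).mp hb
    apply hab
    have e1 : s.toList.head? = some a := by
      cases hpl : p.toList with
      | nil => simp [hpl] at hp
      | cons x xs => rw [hpl] at hp h1; simp at hp; simp [← h1, hp]
    have e2 : s.toList.head? = some b := by
      cases hql : q.toList with
      | nil => simp [hql] at hq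
      | cons x xs => rw [hql] at hq h2; simp at hq; simp [← h2, hq]
    rw [e1] at e2; injection e2

lemma pv_sw_match (g p key : String) (hpair : (g, p) ∈ pvTriples)
    (h : PySem.Str.startswith key p = true) : pvMatch key = some (g, p) := by
  unfold pvMatch
  simp only [pvTriples, List.mem_cons, List.not_mem_nil, or_false, Prod.mk.injEq] at hpair
  rcases hpair with ⟨hg, hp⟩ | ⟨hg, hp⟩ | ⟨hg, hp⟩ <;> subst hg <;> subst hp
  · rw [if_pos h]
  · have hrf := pv_clash key "xgb_" "rf_" 'x' 'r' (by decide) (by decide) (by decide) h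
    rw [if_neg (by rw [hrf]; simp), if_pos h]
  · have hrf := pv_clash key "lgb_" "rf_" 'l' 'r' (by decide) (by decide) (by decide) h
    have hxgb := pv_clash key "lgb_" "xgb_" 'l' 'x' (by decide) (by decide) (by decide) h
    rw [if_neg (by rw [hrf]; simp), if_neg (by rw [hxgb]; simp), if_pos h]

lemma pv_match_group {key g p : String} (h : pvMatch key = some (g, p)) :
    (g, p) ∈ pvTriples ∧ PySem.Str.startswith key p = true := by
  unfold pvMatch at h
  split_ifs at h with h1 h2 h3 <;>
    simp only [Option.some.injEq, Prod.mk.injEq] at h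
  · rcases h with ⟨rfl, rfl⟩; exact ⟨by simp [pvTriples], h1⟩
  · rcases h with ⟨rfl, rfl⟩; exact ⟨by simp [pvTriples], h2⟩
  · rcases h with ⟨rfl, rfl⟩; exact ⟨by simp [pvTriples], h3⟩

-- A's step in terms of pvMatch (A's "ensure present, then overwrite" becomes modify)
lemma pv_step_match (d : PySem.Dict String (PySem.Dict String Int)) (kv : String × Int) :
    pvStepA d kv = match pvMatch kv.1 with
      | none => d
      | some (g, p) => d.modify g PySem.Dict.empty
          (fun i => i.insert (PySem.Str.slice kv.1 (some (PySem.Str.len p)) none) kv.2) := by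
  have hmod : ∀ (k nm : String) (v : Int),
      (let d1 := if d.contains k then d else d.insert k PySem.Dict.empty
       d1.insert k ((d1.getD k PySem.Dict.empty).insert nm v))
        = d.modify k PySem.Dict.empty (fun i => i.insert nm v) := by
    intro k nm v
    show _ = d.insert k ((d.getD k PySem.Dict.empty).insert nm v)
    by_cases h : d.contains k = true
    · simp only [if_pos h]
    · simp only [if_neg h, PySem.Dict.getD_insert_self, PySem.Dict.insert_insert_self,
        show d.getD k PySem.Dict.empty = PySem.Dict.empty from
          PySem.Dict.getD_of_not_contains d PySem.Dict.empty (by simpa using h)]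
  by_cases h1 : PySem.Str.startswith kv.1 "rf_" = true
  · rw [show pvMatch kv.1 = some ("rf", "rf_") from by unfold pvMatch; rw [if_pos h1]]
    unfold pvStepA
    rw [if_pos h1]
    exact hmod "rf" _ kv.2
  · by_cases h2 : PySem.Str.startswith kv.1 "xgb_" = true
    · rw [show pvMatch kv.1 = some ("xgb", "xgb_") from by unfold pvMatch; rw [if_neg h1, if_pos h2]]
      unfold pvStepA
      rw [if_neg h1, if_pos h2]
      exact hmod "xgb" _ kv.2
    · by_cases h3 : PySem.Str.startswith kv.1 "lgb_" = true
      · rw [show pvMatch kv.1 = some ("lgb", "lgb_") from by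
          unfold pvMatch; rw [if_neg h1, if_neg h2, if_pos h3]]
        unfold pvStepA
        rw [if_neg h1, if_neg h2, if_pos h3]
        exact hmod "lgb" _ kv.2
      · rw [show pvMatch kv.1 = none from by unfold pvMatch; rw [if_neg h1, if_neg h2, if_neg h3]]
        unfold pvStepA
        rw [if_neg h1, if_neg h2, if_neg h3]

-- B's pass-1 step in terms of pvMatch
lemma pv_orderStep_match (ord : List String) (key : String) :
    pvOrderStep ord key = match pvMatch key with
      | none => ord
      | some (g, _) => if ord.contains g then ord else ord ++ [g] := by
  unfold pvOrderStep pvMatch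
  rw [show pvPrefixes.items = [("rf", "rf_"), ("xgb", "xgb_"), ("lgb", "lgb_")] from rfl]
  simp only [List.foldl_cons, List.foldl_nil]
  by_cases h1 : PySem.Str.startswith key "rf_" = true
  · have hx := pv_clash key "rf_" "xgb_" 'r' 'x' (by decide) (by decide) (by decide) h1
    have hl := pv_clash key "rf_" "lgb_" 'r' 'l' (by decide) (by decide) (by decide) h1
    rw [h1, hx, hl]
    show _ = if ord.contains "rf" then ord else ord ++ ["rf"]
    cases hc : ord.contains "rf" <;> simp_all
  · rw [Bool.not_eq_true] at h1
    rw [h1]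
    by_cases h2 : PySem.Str.startswith key "xgb_" = true
    · have hl := pv_clash key "xgb_" "lgb_" 'x' 'l' (by decide) (by decide) (by decide) h2
      rw [h2, hl]
      show _ = if ord.contains "xgb" then ord else ord ++ ["xgb"]
      cases hc : ord.contains "xgb" <;> simp_all
    · rw [Bool.not_eq_true] at h2
      rw [h2]
      by_cases h3 : PySem.Str.startswith key "lgb_" = true
      · rw [h3]
        show _ = if ord.contains "lgb" then ord else ord ++ ["lgb"]
        cases hc : ord.contains "lgb" <;> simp_all
      · rw [Bool.not_eq_true] at h3
        rw [h3]
        simp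

lemma pv_orderStep_mem (ord : List String) (key g : String) :
    g ∈ pvOrderStep ord key ↔ g ∈ ord ∨ ∃ p, pvMatch key = some (g, p) := by
  rw [pv_orderStep_match]
  cases hm : pvMatch key with
  | none => simp
  | some gp =>
    obtain ⟨g0, p0⟩ := gp
    show g ∈ (if ord.contains g0 then ord else ord ++ [g0]) ↔
      g ∈ ord ∨ ∃ p, some (g0, p0) = some (g, p)
    cases hc : ord.contains g0 with
    | true =>
      have hmem : g0 ∈ ord := by simpa using hc
      rw [if_pos rfl]
      constructor
      · exact fun h => Or.inl h
      · rintro (h | ⟨p, hp⟩)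
        · exact h
        · simp only [Option.some.injEq, Prod.mk.injEq] at hp
          rw [← hp.1]; exact hmem
    | false =>
      rw [if_neg (by decide), List.mem_append, List.mem_singleton]
      constructor
      · rintro (h | h)
        · exact Or.inl h
        · exact Or.inr ⟨p0, by rw [h]⟩
      · rintro (h | ⟨p, hp⟩)
        · exact Or.inl h
        · simp only [Option.some.injEq, Prod.mk.injEq] at hp
          exact Or.inr hp.1.symm

lemma pv_orderStep_nodup (ord : List String) (key : String) (h : ord.Nodup) :
    (pvOrderStep ord key).Nodup := by
  rw [pv_orderStep_match]
  cases hm : pvMatch key with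
  | none => exact h
  | some gp =>
    obtain ⟨g0, p0⟩ := gp
    show (if ord.contains g0 then ord else ord ++ [g0]).Nodup
    cases hc : ord.contains g0 with
    | true => rw [if_pos rfl]; exact h
    | false =>
      have hnot : g0 ∉ ord := by simpa using hc
      rw [if_neg (by decide)]
      simp [List.nodup_append, h]
      intro a ha he
      exact hnot (he ▸ ha)

lemma pv_order_mem_aux (l : List (String × Int)) (acc : List String) (g : String) :
    g ∈ l.foldl (fun o kv => pvOrderStep o kv.1) acc ↔
      g ∈ acc ∨ ∃ kv ∈ l, ∃ p, pvMatch kv.1 = some (g, p) := by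
  induction l generalizing acc with
  | nil => simp
  | cons x xs ih =>
    simp only [List.foldl_cons, ih, pv_orderStep_mem, List.mem_cons]
    constructor
    · rintro ((h | h) | h)
      · exact Or.inl h
      · exact Or.inr ⟨x, Or.inl rfl, h⟩
      · obtain ⟨kv, hkv, hp⟩ := h
        exact Or.inr ⟨kv, Or.inr hkv, hp⟩
    · rintro (h | ⟨kv, (rfl | hkv), hp⟩)
      · exact Or.inl (Or.inl h)
      · exact Or.inl (Or.inr hp)
      · exact Or.inr ⟨kv, hkv, hp⟩

lemma pv_order_mem (l : List (String × Int)) (g : String) :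
    g ∈ pvOrder l ↔ ∃ kv ∈ l, ∃ p, pvMatch kv.1 = some (g, p) := by
  unfold pvOrder
  rw [pv_order_mem_aux]
  simp

lemma pv_order_nodup (l : List (String × Int)) : (pvOrder l).Nodup := by
  unfold pvOrder
  have : ∀ (acc : List String), acc.Nodup → (l.foldl (fun o kv => pvOrderStep o kv.1) acc).Nodup := by
    induction l with
    | nil => exact fun acc h => h
    | cons x xs ih => exact fun acc h => ih _ (pv_orderStep_nodup acc x.1 h)
  exact this [] List.nodup_nil

-- the prefixes-table lookup for each group in the table
lemma pv_getD_pair {g p : String} (h : (g, p) ∈ pvTriples) : pvPrefixes.getD g "" = p := by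
  simp only [pvTriples, List.mem_cons, List.not_mem_nil, or_false, Prod.mk.injEq] at h
  rcases h with ⟨hg, hp⟩ | ⟨hg, hp⟩ | ⟨hg, hp⟩ <;> subst hg <;> subst hp <;> decide

lemma pv_inner_append (l : List (String × Int)) (kv : String × Int) (g : String) :
    pvInner (l ++ [kv]) g =
      if PySem.Str.startswith kv.1 (pvPrefixes.getD g "")
      then (pvInner l g).insert (PySem.Str.slice kv.1 (some (PySem.Str.len (pvPrefixes.getD g ""))) none) kv.2
      else pvInner l g := by
  unfold pvInner
  rw [List.foldl_append]
  rfl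

-- items of pass-2's dict-of-dicts build over a duplicate-free group list
lemma pv_build_items (ord : List String) (f : String → PySem.Dict String Int) (h : ord.Nodup) :
    (ord.foldl (fun d g => d.insert g (f g)) PySem.Dict.empty).items
      = ord.map (fun g => (g, f g)) := by
  have := PySem.Dict.items_foldl_insert_fresh ord (fun g => g) f PySem.Dict.empty
    (fun a _ => by simp) (by simpa using h)
  simpa using this

lemma pv_build_keys (ord : List String) (f : String → PySem.Dict String Int) (h : ord.Nodup) :
    (ord.foldl (fun d g => d.insert g (f g)) PySem.Dict.empty).keys = ord := by
  show ((ord.foldl (fun d g => d.insert g (f g)) PySem.Dict.empty).items).map Prod.fst = ord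
  rw [pv_build_items ord f h]
  have hid : (Prod.fst ∘ fun g : String => (g, f g)) = id := rfl
  rw [List.map_map, hid, List.map_id]

-- main invariant: A's accumulating fold equals B's two-stage construction
lemma pv_main (l : List (String × Int)) :
    l.foldl pvStepA PySem.Dict.empty
      = (pvOrder l).foldl (fun d g => d.insert g (pvInner l g)) PySem.Dict.empty := by
  induction l using List.reverseRecOn with
  | nil => rfl
  | append_singleton l kv ih =>
    have horder : pvOrder (l ++ [kv]) = pvOrderStep (pvOrder l) kv.1 := by
      unfold pvOrder; rw [List.foldl_append]; rfl
    rw [List.foldl_append, List.foldl_cons, List.foldl_nil, ih, pv_step_match, horder,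
        pv_orderStep_match]
    have hnd := pv_order_nodup l
    cases hm : pvMatch kv.1 with
    | none =>
      -- kv matches no prefix: order unchanged, every group's filter unchanged
      apply PySem.List.foldl_congr_mem'
      intro g hg d
      obtain ⟨kv', _, p', hp'⟩ := (pv_order_mem l g).mp hg
      obtain ⟨hpair, _⟩ := pv_match_group hp'
      have hsw : PySem.Str.startswith kv.1 (pvPrefixes.getD g "") = false := by
        rw [pv_getD_pair hpair]
        cases hb : PySem.Str.startswith kv.1 p' with
        | false => rfl
        | true => rw [pv_sw_match g p' kv.1 hpair hb] at hm; exact absurd hm (by simp)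
      rw [pv_inner_append, hsw, if_neg (by simp)]
    | some gp =>
      obtain ⟨g0, p0⟩ := gp
      obtain ⟨hpair0, hsw0⟩ := pv_match_group hm
      have hpre0 : pvPrefixes.getD g0 "" = p0 := pv_getD_pair hpair0
      -- groups other than g0 are untouched by kv
      have hother : ∀ g ∈ pvOrder l, g ≠ g0 → pvInner (l ++ [kv]) g = pvInner l g := by
        intro g hg hne
        obtain ⟨kv', _, p', hp'⟩ := (pv_order_mem l g).mp hg
        obtain ⟨hpair, _⟩ := pv_match_group hp'
        have hsw : PySem.Str.startswith kv.1 (pvPrefixes.getD g "") = false := by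
          rw [pv_getD_pair hpair]
          cases hb : PySem.Str.startswith kv.1 p' with
          | false => rfl
          | true =>
            rw [pv_sw_match g p' kv.1 hpair hb] at hm
            simp only [Option.some.injEq, Prod.mk.injEq] at hm
            exact absurd hm.1 hne
        rw [pv_inner_append, hsw, if_neg (by simp)]
      have hg0new : pvInner (l ++ [kv]) g0
          = (pvInner l g0).insert (PySem.Str.slice kv.1 (some (PySem.Str.len p0)) none) kv.2 := by
        rw [pv_inner_append, hpre0, hsw0, if_pos rfl]
      show ((List.foldl (fun d g => d.insert g (pvInner l g)) PySem.Dict.empty (pvOrder l)).modify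
          g0 PySem.Dict.empty
          (fun i => i.insert (PySem.Str.slice kv.1 (some (PySem.Str.len p0)) none) kv.2))
        = List.foldl (fun d g => d.insert g (pvInner (l ++ [kv]) g)) PySem.Dict.empty
            (if (pvOrder l).contains g0 then pvOrder l else pvOrder l ++ [g0])
      by_cases hc : List.contains (pvOrder l) g0 = true
      · -- g0 already present: modify overwrites its slot in place
        have hg0mem : g0 ∈ pvOrder l := by simpa using hc
        rw [if_pos hc]
        show (((pvOrder l).foldl (fun d g => d.insert g (pvInner l g)) PySem.Dict.empty).insert g0
            ((((pvOrder l).foldl (fun d g => d.insert g (pvInner l g)) PySem.Dict.empty).getD g0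
              PySem.Dict.empty).insert (PySem.Str.slice kv.1 (some (PySem.Str.len p0)) none) kv.2)) = _
        have hgetD : ((pvOrder l).foldl (fun d g => d.insert g (pvInner l g)) PySem.Dict.empty).getD g0
            PySem.Dict.empty = pvInner l g0 := by
          apply PySem.Dict.getD_of_mem_items
          · rw [pv_build_items _ _ hnd]
            exact List.mem_map.mpr ⟨g0, hg0mem, rfl⟩
          · rw [pv_build_keys _ _ hnd]; exact hnd
        rw [hgetD]
        apply PySem.Dict.ext
        rw [PySem.Dict.items_insert_of_contains _ _
            (by rw [PySem.Dict.contains_iff_mem_keys, pv_build_keys _ _ hnd]; exact hg0mem),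
          pv_build_items _ _ hnd, pv_build_items _ _ hnd, List.map_map]
        apply List.map_congr_left
        intro g hg
        by_cases hge : g = g0
        · subst hge
          simp [hg0new]
        · have := hother g hg hge
          simp [Function.comp, hge, this]
      · -- g0 new: its filtered dict over l is empty, modify appends it
        have hg0not : g0 ∉ pvOrder l := by simpa using hc
        rw [if_neg hc]
        show (((pvOrder l).foldl (fun d g => d.insert g (pvInner l g)) PySem.Dict.empty).insert g0
            ((((pvOrder l).foldl (fun d g => d.insert g (pvInner l g)) PySem.Dict.empty).getD g0
              PySem.Dict.empty).insert (PySem.Str.slice kv.1 (some (PySem.Str.len p0)) none) kv.2)) = _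
        have hcontains : ((pvOrder l).foldl (fun d g => d.insert g (pvInner l g))
            PySem.Dict.empty).contains g0 = false := by
          cases hb : ((pvOrder l).foldl (fun d g => d.insert g (pvInner l g))
              PySem.Dict.empty).contains g0 with
          | false => rfl
          | true =>
            rw [PySem.Dict.contains_iff_mem_keys, pv_build_keys _ _ hnd] at hb
            exact absurd hb hg0not
        have hinner0 : pvInner l g0 = PySem.Dict.empty := by
          unfold pvInner
          rw [PySem.List.foldl_congr_mem' l _ (fun d _ => d) PySem.Dict.empty ?_,
              PySem.List.foldl_ignore]
          intro kv' hkv' d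
          have hsw : PySem.Str.startswith kv'.1 (pvPrefixes.getD g0 "") = false := by
            rw [hpre0]
            cases hb : PySem.Str.startswith kv'.1 p0 with
            | false => rfl
            | true =>
              exact absurd ((pv_order_mem l g0).mpr ⟨kv', hkv', p0,
                pv_sw_match g0 p0 kv'.1 hpair0 hb⟩) hg0not
          rw [hsw, if_neg (by simp)]
        rw [PySem.Dict.getD_of_not_contains _ _ hcontains]
        apply PySem.Dict.ext
        have hnd' : (pvOrder l ++ [g0]).Nodup := by
          simp [List.nodup_append, hnd]
          intro a ha he
          exact hg0not (he ▸ ha)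
        rw [PySem.Dict.items_insert_of_not_contains _ _ hcontains,
          pv_build_items _ _ hnd, pv_build_items _ _ hnd', List.map_append]
        congr 1
        · apply List.map_congr_left
          intro g hg
          have hge : g ≠ g0 := fun he => hg0not (he ▸ hg)
          rw [hother g hg hge]
        · simp [hg0new, hinner0]

-- ===== VERDICT (by name: the statement is the Claim_ definition above) =====
theorem extract_best_params_from_optuna_py_spec : Claim_equal_extract_best_params_from_optuna_py := by
  intro bp _
  unfold Spec_extract_best_params_from_optuna_py extract_best_params_from_optuna_py
    extract_best_params_from_optuna_py_alt
  rw [pv_main]
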